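-- pv_equiv track=rewrite | github.com/AlexisLenoir/Benchtrack | code/src/BenchTrack/tools.py | generateAgrs2D
-- ===== SOURCE A (Python) =====
-- def generateAgrs2D(list2D):
--     args = [""]
--     for listArgs in list2D:
--         aux = []
--         for i in listArgs:
--             for j in args:
--                 aux.append(j+' '+str(i))
--         args = aux
--     return args
-- ===== SOURCE B (Python) =====
-- import itertools
--
-- def generateAgrs2D(list2D):
--     return [''.join(' ' + str(x) for x in reversed(combo))
--             for combo in itertools.product(*reversed(list2D))]
-- ===== Notes on version B (the rewrite author's own statement) =====
-- stated objective: idiomatic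
-- what changed: Replaces A's incremental loop that rebuilds the whole partial-result list for each sublist with a single itertools.product over the reversed axes plus one join per tuple.
import Mathlib
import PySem

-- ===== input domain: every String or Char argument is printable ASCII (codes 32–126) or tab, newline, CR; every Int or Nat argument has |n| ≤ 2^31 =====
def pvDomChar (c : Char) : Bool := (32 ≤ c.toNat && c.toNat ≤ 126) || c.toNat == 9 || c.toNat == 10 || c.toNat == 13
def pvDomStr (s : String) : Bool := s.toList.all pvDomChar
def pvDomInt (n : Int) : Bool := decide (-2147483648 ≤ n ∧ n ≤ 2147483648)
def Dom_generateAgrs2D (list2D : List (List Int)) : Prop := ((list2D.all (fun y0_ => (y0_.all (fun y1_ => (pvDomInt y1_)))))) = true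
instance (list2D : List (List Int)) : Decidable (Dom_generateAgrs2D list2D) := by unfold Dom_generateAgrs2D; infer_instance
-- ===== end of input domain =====

-- B replaces A's incremental rebuild-the-whole-list loop by itertools.product over the
-- reversed axes plus a join per tuple (objective: idiomatic; same cost).

-- ===== PORT A =====
-- args = [""] ; for listArgs: aux = [] ; for i: for j in args: aux.append(j+' '+str(i)) ; args = aux
def generateAgrs2D (list2D : List (List Int)) : List String :=
  list2D.foldl (fun args listArgs =>
    listArgs.foldl (fun aux i =>
      args.foldl (fun aux2 j => aux2 ++ [j ++ " " ++ PySem.Int.toStr i]) aux) []) [""]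

-- ===== PORT B =====
-- itertools.product(*axes): first axis varies slowest (exact port of product's order)
def pyProduct : List (List Int) → List (List Int)
  | [] => [[]]
  | xs :: rest => xs.flatMap (fun x => (pyProduct rest).map (fun t => x :: t))

-- [''.join(' ' + str(x) for x in reversed(combo)) for combo in itertools.product(*reversed(list2D))]
def generateAgrs2D_alt (list2D : List (List Int)) : List String :=
  (pyProduct list2D.reverse).map (fun combo =>
    PySem.Str.join "" (combo.reverse.map (fun x => " " ++ PySem.Int.toStr x)))

-- ===== PRECONDITION & SPEC =====
def Spec_generateAgrs2D (list2D : List (List Int)) (out : List String) : Prop := out = generateAgrs2D_alt list2D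
instance (list2D : List (List Int)) (out : List String) : Decidable (Spec_generateAgrs2D list2D out) := by unfold Spec_generateAgrs2D; infer_instance

-- ===== CLAIM (what is proved, stated in full; the proofs are below) =====
def Claim_equal_generateAgrs2D : Prop := ∀ (list2D : List (List Int)), Dom_generateAgrs2D list2D → Spec_generateAgrs2D list2D (generateAgrs2D list2D)

-- ===== LEMMAS AND PROOFS =====

theorem cjoin_snoc (l : List (List Char)) (c : List Char) :
    PySem.Chars.join [] (l ++ [c]) = PySem.Chars.join [] l ++ c := by
  induction l with
  | nil => simp [PySem.Chars.join_nil, PySem.Chars.join_singleton]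
  | cons a t ih =>
    cases t with
    | nil => simp [PySem.Chars.join_singleton, PySem.Chars.join_cons_cons]
    | cons b u => simp_all [PySem.Chars.join_cons_cons]

theorem sjoin_snoc (l : List String) (s : String) :
    PySem.Str.join "" (l ++ [s]) = PySem.Str.join "" l ++ s := by
  apply String.toList_injective
  simp [PySem.Str.toList_join, cjoin_snoc]

-- the per-tuple string B builds
def gJoin (combo : List Int) : String :=
  PySem.Str.join "" (combo.reverse.map (fun x => " " ++ PySem.Int.toStr x))

theorem gJoin_cons (i : Int) (t : List Int) :
    gJoin (i :: t) = gJoin t ++ " " ++ PySem.Int.toStr i := by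
  simp [gJoin, sjoin_snoc, String.append_assoc]

-- A's body for one list of arguments
theorem step_eq (args : List String) (xs : List Int) :
    xs.foldl (fun aux i =>
      args.foldl (fun aux2 j => aux2 ++ [j ++ " " ++ PySem.Int.toStr i]) aux) []
      = xs.flatMap (fun i => args.map (fun j => j ++ " " ++ PySem.Int.toStr i)) := by
  have h : ∀ (acc : List String) (i : Int),
      args.foldl (fun aux2 j => aux2 ++ [j ++ " " ++ PySem.Int.toStr i]) acc
        = acc ++ args.map (fun j => j ++ " " ++ PySem.Int.toStr i) := by
    intro acc i; exact PySem.List.foldl_append_singleton_eq_map _ _ _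
  calc xs.foldl (fun aux i =>
        args.foldl (fun aux2 j => aux2 ++ [j ++ " " ++ PySem.Int.toStr i]) aux) []
      = xs.foldl (fun aux i => aux ++ args.map (fun j => j ++ " " ++ PySem.Int.toStr i)) [] := by
        induction xs with
        | nil => rfl
        | cons a t iht =>
          simp only [List.foldl_cons, h]
    _ = xs.flatMap (fun i => args.map (fun j => j ++ " " ++ PySem.Int.toStr i)) := by
        simpa using
          (PySem.List.foldl_append_eq_flatMap
            (g := fun i => args.map (fun j => j ++ " " ++ PySem.Int.toStr i)) (l := xs) (acc := []))

theorem main_eq (list2D : List (List Int)) :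
    generateAgrs2D list2D = (pyProduct list2D.reverse).map gJoin := by
  induction list2D using List.reverseRecOn with
  | nil => simp [generateAgrs2D, pyProduct, gJoin, PySem.Str.join]
  | append_singleton l xs ih =>
    have lhs : generateAgrs2D (l ++ [xs])
        = xs.flatMap (fun i =>
            (generateAgrs2D l).map (fun j => j ++ " " ++ PySem.Int.toStr i)) := by
      simp only [generateAgrs2D, List.foldl_append, List.foldl_cons, List.foldl_nil]
      exact step_eq _ xs
    rw [lhs, ih]
    simp only [List.reverse_append, List.reverse_singleton, List.singleton_append,
      pyProduct, List.map_flatMap, List.map_map]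
    apply List.flatMap_congr
    intro i _
    apply List.map_congr_left
    intro t _
    simp [Function.comp, gJoin_cons]

-- ===== VERDICT (by name: the statement is the Claim_ definition above) =====
theorem generateAgrs2D_spec : Claim_equal_generateAgrs2D := by
  intro list2D _
  show generateAgrs2D list2D = generateAgrs2D_alt list2D
  rw [main_eq]; rfl
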